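-- pv_equiv track=rewrite | github.com/InayatRasul/Web-Dev | Lab7/codingbat/Logic-2/2lucky_sum.py | lucky_sum
-- ===== SOURCE A (Python) =====
-- def lucky_sum(a, b, c):
--   nums = [a,b,c]
--   sum = 0
--   for i in nums:
--     if(i != 13):
--       sum+= i
--     else:
--       break
--   return sum
-- ===== SOURCE B (Python) =====
-- def lucky_sum(a, b, c):
--     # Branchless closed form: a keep-flag per position, each flag implying the previous.
--     ka = a != 13
--     kb = ka and b != 13
--     kc = kb and c != 13
--     return a * ka + b * kb + c * kc
-- ===== Notes on version B (the rewrite author's own statement) =====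
-- stated objective: alternative
-- what changed: B replaces the list-and-break loop with a branchless closed form: three boolean keep-flags (each implying the previous) multiply the corresponding argument, and the three products are added.
import Mathlib
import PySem

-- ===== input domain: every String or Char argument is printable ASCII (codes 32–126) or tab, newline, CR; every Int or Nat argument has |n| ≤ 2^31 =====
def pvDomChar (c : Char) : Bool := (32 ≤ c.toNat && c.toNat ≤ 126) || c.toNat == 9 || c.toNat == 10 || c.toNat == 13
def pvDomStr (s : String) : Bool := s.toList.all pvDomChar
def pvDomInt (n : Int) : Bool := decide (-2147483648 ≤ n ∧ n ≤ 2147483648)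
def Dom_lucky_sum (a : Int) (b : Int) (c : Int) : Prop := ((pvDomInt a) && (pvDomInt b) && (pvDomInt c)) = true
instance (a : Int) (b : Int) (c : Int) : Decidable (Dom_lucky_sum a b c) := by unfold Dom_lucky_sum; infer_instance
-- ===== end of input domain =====

-- B replaces A's list-and-break loop by a branchless closed form (keep-flags × arguments); objective: alternative decomposition.


-- ===== PORT A =====
-- A: accumulate over the list [a,b,c], breaking at the first 13
def luckyLoopA : List Int → Int → Int
  | [], s => s
  | i :: rest, s => if i ≠ 13 then luckyLoopA rest (s + i) else s

def lucky_sum (a : Int) (b : Int) (c : Int) : Int :=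
  luckyLoopA [a, b, c] 0

-- ===== PORT B =====
-- B: branchless closed form; bool→int multiplication ported as 'if flag then 1 else 0'
def lucky_sum_alt (a : Int) (b : Int) (c : Int) : Int :=
  let ka : Bool := a ≠ 13
  let kb : Bool := ka && b ≠ 13
  let kc : Bool := kb && c ≠ 13
  a * (if ka then 1 else 0) + b * (if kb then 1 else 0) + c * (if kc then 1 else 0)

-- ===== PRECONDITION & SPEC =====
def Spec_lucky_sum (a : Int) (b : Int) (c : Int) (out : Int) : Prop := out = lucky_sum_alt a b c
instance (a : Int) (b : Int) (c : Int) (out : Int) : Decidable (Spec_lucky_sum a b c out) := by unfold Spec_lucky_sum; infer_instance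

-- ===== CLAIM =====
def Claim_equal_lucky_sum : Prop := ∀ (a : Int) (b : Int) (c : Int), Dom_lucky_sum a b c → Spec_lucky_sum a b c (lucky_sum a b c)

-- ===== LEMMAS AND PROOFS =====

-- ===== VERDICT =====
theorem lucky_sum_spec : Claim_equal_lucky_sum := by
  intro a b c _
  unfold Spec_lucky_sum lucky_sum lucky_sum_alt
  by_cases ha : a = 13 <;> by_cases hb : b = 13 <;> by_cases hc : c = 13 <;>
    simp [ha, hb, hc, luckyLoopA] <;> ring
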